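-- pv_equiv track=rewrite | github.com/nocarryr/jvconnected | src/jvconnected/interfaces/netlinx/client.py | iter_messages
-- ===== SOURCE A (Python) =====
-- from typing import Iterator, Optional, Literal, Sequence
--
-- def iter_messages(rx_str: str) -> Iterator[Sequence[str]]:
--     remaining = rx_str
--     while '<' in remaining and '>' in remaining:
--         start_ix = remaining.index('<')
--         end_ix = remaining.find('>', start_ix)
--         if end_ix == -1:
--             break
--         msg = remaining[start_ix:end_ix+1]
--         try:
--             remaining = remaining[end_ix+1:]
--         except IndexError:
--             remaining = ''
--         yield msg, remaining
--     yield '', remaining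
-- ===== SOURCE B (Python) =====
-- def iter_messages(rx_str):
--     # Single left-to-right state-machine pass over absolute indices,
--     # instead of A's repeated index()/find() scans and suffix reslicing.
--     inside = False
--     start = 0
--     last_end = 0
--     for i, c in enumerate(rx_str):
--         if not inside:
--             if c == '<':
--                 inside = True
--                 start = i
--         elif c == '>':
--             yield rx_str[start:i + 1], rx_str[i + 1:]
--             inside = False
--             last_end = i + 1
--     yield '', rx_str[last_end:]
-- ===== Notes on version B (the rewrite author's own statement) =====
-- stated objective: alternative
-- what changed: B replaces A's repeated index()/find() scans over a re-sliced `remaining` string with a single left-to-right state-machine pass over absolute indices, yielding each bracketed message as soon as its closing bracket is reached.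
import Mathlib
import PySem

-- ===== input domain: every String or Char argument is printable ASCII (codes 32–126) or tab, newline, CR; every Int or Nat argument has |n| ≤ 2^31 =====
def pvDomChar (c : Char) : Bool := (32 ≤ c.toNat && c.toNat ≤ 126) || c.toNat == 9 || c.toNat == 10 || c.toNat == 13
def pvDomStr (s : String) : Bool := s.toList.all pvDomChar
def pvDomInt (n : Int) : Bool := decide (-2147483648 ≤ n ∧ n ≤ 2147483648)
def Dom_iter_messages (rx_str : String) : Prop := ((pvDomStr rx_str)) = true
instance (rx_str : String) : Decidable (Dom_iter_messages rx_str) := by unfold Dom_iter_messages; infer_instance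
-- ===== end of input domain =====

-- B replaces A's repeated index()/find() scans with reslicing by one left-to-right
-- state-machine pass over absolute indices (objective: alternative, same cost).
-- Both programs are generators; the ports return the list of yielded pairs.

-- ===== PORT A =====
-- A's while loop over the shrinking `remaining`; `remaining.index('<')` = idxOf (membership
-- guaranteed by the guard), `remaining.find('>', start_ix)` = start + idxOf in the suffix, or -1
-- when absent; slicing with nonnegative in-range indices = take/drop (the except-IndexError
-- branch is dead: Python slicing never raises).
def aLoop (rem : List Char) : List (String × String) :=
  if h : '<' ∈ rem ∧ '>' ∈ rem then
    let start := rem.idxOf '<'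
    let t := rem.drop start
    let endIx : Int := if '>' ∈ t then ((start + t.idxOf '>' : Nat) : Int) else -1
    if endIx = -1 then [("", String.ofList rem)]
    else
      let e := start + t.idxOf '>'
      let msg := String.ofList ((rem.drop start).take (e + 1 - start))
      let rem' := rem.drop (e + 1)
      (msg, String.ofList rem') :: aLoop rem'
  else [("", String.ofList rem)]
termination_by rem.length
decreasing_by
  have hne : rem ≠ [] := List.ne_nil_of_mem h.1
  have : 0 < rem.length := List.length_pos_iff.mpr hne
  simp only [List.length_drop]
  omega

def iter_messages (rx_str : String) : List (String × String) :=
  aLoop rx_str.toList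

-- ===== PORT B =====
-- Source B's for-loop over enumerate(rx_str) as structural recursion on the remaining characters,
-- carrying the same state (inside, start, last_end, yields); slices rx_str[start:i+1] and
-- rx_str[i+1:] are take/drop on the full character list with absolute indices.
def bLoop (full : List Char) : List Char → Nat → Bool → Nat → Nat → List (String × String) → List (String × String)
  | [], _, _, _, lastEnd, acc => acc ++ [("", String.ofList (full.drop lastEnd))]
  | c :: cs, i, inside, start, lastEnd, acc =>
    if inside then
      if c = '>' then
        bLoop full cs (i + 1) false start (i + 1)
          (acc ++ [(String.ofList ((full.drop start).take (i + 1 - start)), String.ofList (full.drop (i + 1)))])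
      else bLoop full cs (i + 1) true start lastEnd acc
    else
      if c = '<' then bLoop full cs (i + 1) true i lastEnd acc
      else bLoop full cs (i + 1) false start lastEnd acc

def iter_messages_alt (rx_str : String) : List (String × String) :=
  bLoop rx_str.toList rx_str.toList 0 false 0 0 []

-- ===== PRECONDITION & SPEC =====
def Spec_iter_messages (rx_str : String) (out : List (String × String)) : Prop := out = iter_messages_alt rx_str
instance (rx_str : String) (out : List (String × String)) : Decidable (Spec_iter_messages rx_str out) := by unfold Spec_iter_messages; infer_instance

-- ===== CLAIM (what is proved, stated in full; the proofs are below) =====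
def Claim_equal_iter_messages : Prop := ∀ (rx_str : String), Dom_iter_messages rx_str → Spec_iter_messages rx_str (iter_messages rx_str)

-- ===== LEMMAS AND PROOFS =====

-- first-occurrence decomposition
theorem firstSplit {c : Char} {l : List Char} (h : c ∈ l) :
    ∃ pre rest, l = pre ++ c :: rest ∧ c ∉ pre ∧ pre.length = l.idxOf c := by
  induction l with
  | nil => cases h
  | cons x xs ih =>
    by_cases hx : x = c
    · subst hx
      exact ⟨[], xs, rfl, by simp, by simp⟩
    · have hmem : c ∈ xs := by
        rcases List.mem_cons.mp h with h1 | h1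
        · exact absurd h1.symm hx
        · exact h1
      obtain ⟨pre, rest, heq, hnp, hlen⟩ := ih hmem
      refine ⟨x :: pre, rest, by simp [heq], ?_, ?_⟩
      · simp [hnp]; exact fun hh => hx hh.symm
      · simp [hx, hlen]

-- outside state, no '<' ahead: scan runs to the end
theorem bLoop_outside_none (full : List Char) (cs : List Char) (h : '<' ∉ cs) :
    ∀ i s le acc, bLoop full cs i false s le acc = acc ++ [("", String.ofList (full.drop le))] := by
  induction cs with
  | nil => intro i s le acc; simp [bLoop]
  | cons c cs ih =>
    intro i s le acc
    have hc : c ≠ '<' := fun hh => h (hh ▸ List.mem_cons_self)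
    have hcs : '<' ∉ cs := fun hh => h (List.mem_cons_of_mem _ hh)
    simp [bLoop, hc, ih hcs]

-- outside state: skip to the first '<'
theorem bLoop_outside_skip (full : List Char) (pre rest : List Char) (h : '<' ∉ pre) :
    ∀ i s le acc, bLoop full (pre ++ '<' :: rest) i false s le acc =
      bLoop full rest (i + pre.length + 1) true (i + pre.length) le acc := by
  induction pre with
  | nil => intro i s le acc; simp [bLoop]
  | cons c pre ih =>
    intro i s le acc
    have hc : c ≠ '<' := fun hh => h (hh ▸ List.mem_cons_self)
    have hp : '<' ∉ pre := fun hh => h (List.mem_cons_of_mem _ hh)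
    have h1 : bLoop full (c :: (pre ++ '<' :: rest)) i false s le acc
        = bLoop full (pre ++ '<' :: rest) (i + 1) false s le acc := by
      simp [bLoop, hc]
    rw [List.cons_append, h1, ih hp, List.length_cons]
    ring_nf

-- inside state, no '>' ahead: scan runs to the end
theorem bLoop_inside_none (full : List Char) (cs : List Char) (h : '>' ∉ cs) :
    ∀ i s le acc, bLoop full cs i true s le acc = acc ++ [("", String.ofList (full.drop le))] := by
  induction cs with
  | nil => intro i s le acc; simp [bLoop]
  | cons c cs ih =>
    intro i s le acc
    have hc : c ≠ '>' := fun hh => h (hh ▸ List.mem_cons_self)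
    have hcs : '>' ∉ cs := fun hh => h (List.mem_cons_of_mem _ hh)
    simp [bLoop, hc, ih hcs]

-- inside state: skip to the first '>' and emit
theorem bLoop_inside_skip (full : List Char) (mid rest : List Char) (h : '>' ∉ mid) :
    ∀ i s le acc, bLoop full (mid ++ '>' :: rest) i true s le acc =
      bLoop full rest (i + mid.length + 1) false s (i + mid.length + 1)
        (acc ++ [(String.ofList ((full.drop s).take (i + mid.length + 1 - s)),
                  String.ofList (full.drop (i + mid.length + 1)))]) := by
  induction mid with
  | nil => intro i s le acc; simp [bLoop]
  | cons c mid ih =>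
    intro i s le acc
    have hc : c ≠ '>' := fun hh => h (hh ▸ List.mem_cons_self)
    have hm : '>' ∉ mid := fun hh => h (List.mem_cons_of_mem _ hh)
    have h1 : bLoop full (c :: (mid ++ '>' :: rest)) i true s le acc
        = bLoop full (mid ++ '>' :: rest) (i + 1) true s le acc := by
      simp [bLoop, hc]
    rw [List.cons_append, h1, ih hm, List.length_cons]
    ring_nf

-- index of the first occurrence
theorem idxOf_first {c : Char} (pre rest : List Char) (h : c ∉ pre) :
    (pre ++ c :: rest).idxOf c = pre.length := by
  induction pre with
  | nil => simp
  | cons x xs ih =>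
    have hx : x ≠ c := fun hh => h (hh ▸ List.mem_cons_self)
    have hxs : c ∉ xs := fun hh => h (List.mem_cons_of_mem _ hh)
    simp [hx, ih hxs]

-- extracting one message slice
theorem take_msg (mid rest2 : List Char) :
    ('<' :: (mid ++ '>' :: rest2)).take (mid.length + 2) = '<' :: (mid ++ ['>']) := by
  have h1 : (mid ++ '>' :: rest2).take (mid.length + 1) = mid ++ ['>'] := by
    simp [List.take_append]
  simp [h1]

-- one step of A's loop when a complete message is present
theorem aLoop_step (pre mid rest2 : List Char)
    (hnp : '<' ∉ pre) (hnm : '>' ∉ ('<' :: mid)) :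
    aLoop (pre ++ '<' :: (mid ++ '>' :: rest2)) =
      (String.ofList ('<' :: (mid ++ ['>'])), String.ofList rest2) :: aLoop rest2 := by
  set rem := pre ++ '<' :: (mid ++ '>' :: rest2) with hremdef
  have hlt : '<' ∈ rem := by simp [hremdef]
  have hgrem : '>' ∈ rem := by simp [hremdef]
  have hstart : rem.idxOf '<' = pre.length := idxOf_first pre _ hnp
  have hdropstart : rem.drop pre.length = '<' :: (mid ++ '>' :: rest2) := by
    rw [hremdef, List.drop_left]
  have hgt' : '>' ∈ '<' :: (mid ++ '>' :: rest2) := by simp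
  have hidxt : ('<' :: (mid ++ '>' :: rest2)).idxOf '>' = mid.length + 1 := by
    have he : '<' :: (mid ++ '>' :: rest2) = ('<' :: mid) ++ '>' :: rest2 := by simp
    rw [he, idxOf_first _ _ hnm]; simp
  have hdropall : rem.drop (pre.length + (mid.length + 1) + 1) = rest2 := by
    have he : rem = (pre ++ '<' :: (mid ++ ['>'])) ++ rest2 := by simp [hremdef]
    have hl : (pre ++ '<' :: (mid ++ ['>'])).length = pre.length + (mid.length + 1) + 1 := by
      simp; omega
    rw [he, ← hl, List.drop_left]
  rw [aLoop, dif_pos ⟨hlt, hgrem⟩]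
  simp only [hstart, hdropstart, hidxt, if_pos hgt']
  rw [if_neg (by omega)]
  have harith : pre.length + (mid.length + 1) + 1 - pre.length = mid.length + 2 := by omega
  rw [harith, take_msg, hdropall]

-- A's loop yields only the final pair when the first '<' has no '>' after it
theorem aLoop_stop (pre rest : List Char) (hnp : '<' ∉ pre) (hgt : '>' ∉ rest) :
    aLoop (pre ++ '<' :: rest) = [("", String.ofList (pre ++ '<' :: rest))] := by
  set rem := pre ++ '<' :: rest with hremdef
  have hlt : '<' ∈ rem := by simp [hremdef]
  rw [aLoop]
  by_cases hgrem : '>' ∈ rem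
  · rw [dif_pos ⟨hlt, hgrem⟩]
    have hstart : rem.idxOf '<' = pre.length := idxOf_first pre _ hnp
    have hdropstart : rem.drop pre.length = '<' :: rest := by
      rw [hremdef, List.drop_left]
    have hnt : '>' ∉ '<' :: rest := by
      intro hh
      rcases List.mem_cons.mp hh with h1 | h1
      · exact absurd h1.symm (by decide)
      · exact hgt h1
    simp only [hstart, hdropstart, if_neg hnt]
    simp
  · rw [dif_neg (by tauto)]

theorem bLoop_eq_aLoop (full : List Char) :
    ∀ n i s acc, full.length ≤ i + n →
      bLoop full (full.drop i) i false s i acc = acc ++ aLoop (full.drop i) := by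
  intro n
  induction n with
  | zero =>
    intro i s acc hle
    have hnil : full.drop i = [] := List.drop_eq_nil_of_le (by omega)
    rw [hnil]
    simp [bLoop, aLoop, hnil]
  | succ n ih =>
    intro i s acc hle
    by_cases hlt : '<' ∈ full.drop i
    · obtain ⟨pre, rest, hsplit, hnp, hlenp⟩ := firstSplit hlt
      have hdrop1 : full.drop (i + pre.length) = '<' :: rest := by
        rw [← List.drop_drop, hsplit, List.drop_left]
      by_cases hgt : '>' ∈ rest
      · -- a complete message: both emit it and continue after the '>'
        obtain ⟨mid, rest2, hsplit2, hnm, _⟩ := firstSplit hgt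
        have hnm' : '>' ∉ ('<' :: mid) := by
          intro hh
          rcases List.mem_cons.mp hh with h1 | h1
          · exact absurd h1.symm (by decide)
          · exact hnm h1
        subst hsplit2
        have hdropj : full.drop (i + pre.length + 1 + mid.length + 1) = rest2 := by
          have he : i + pre.length + 1 + mid.length + 1
              = i + (pre.length + (mid.length + 1) + 1) := by omega
          have hlp : (pre ++ '<' :: (mid ++ ['>'])).length
              = pre.length + (mid.length + 1) + 1 := by simp; omega
          rw [he, ← List.drop_drop, hsplit, ← hlp]
          have he2 : pre ++ '<' :: (mid ++ '>' :: rest2)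
              = (pre ++ '<' :: (mid ++ ['>'])) ++ rest2 := by simp
          rw [he2, List.drop_left]
        -- B side: skip to '<', then to '>', emitting the pair
        rw [hsplit, bLoop_outside_skip full pre _ hnp,
            bLoop_inside_skip full mid rest2 hnm]
        have harith : i + pre.length + 1 + mid.length + 1 - (i + pre.length)
            = mid.length + 2 := by omega
        rw [harith, hdrop1, take_msg, ← hdropj,
            ih (i + pre.length + 1 + mid.length + 1) (i + pre.length) _ (by omega),
            hdropj, aLoop_step pre mid rest2 hnp hnm']
        simp
      · -- no closing '>' after the first '<': both yield only ('', rem)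
        rw [hsplit, bLoop_outside_skip full pre rest hnp,
            bLoop_inside_none full rest hgt, aLoop_stop pre rest hnp hgt, ← hsplit]
    · -- no '<' at all: both yield only ('', rem)
      have ha : aLoop (full.drop i) = [("", String.ofList (full.drop i))] := by
        rw [aLoop, dif_neg (by tauto)]
      rw [bLoop_outside_none full _ hlt i s i acc, ha]

-- ===== VERDICT (by name: the statement is the Claim_ definition above) =====
theorem iter_messages_spec : Claim_equal_iter_messages := by
  intro rx_str _
  unfold Spec_iter_messages iter_messages iter_messages_alt
  have := bLoop_eq_aLoop rx_str.toList rx_str.toList.length 0 0 [] (by omega)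
  simpa using this.symm
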